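-- pv_equiv track=rewrite | github.com/meg13/ACTAM25-LivePlanting | audio_controller_http.py | build_major_offsets_3_octaves
-- ===== SOURCE A (Python) =====
-- MAJOR_DEGREES = [0, 2, 4, 5, 7, 9, 11]
--
-- def build_major_offsets_3_octaves(max_semitones=36):
--     offs = []
--     for octv in range(0, 4):
--         for d in MAJOR_DEGREES:
--             s = octv * 12 + d
--             if s <= max_semitones:
--                 offs.append(s)
--     return sorted(set(offs))
-- ===== SOURCE B (Python) =====
-- _PC = {0, 2, 4, 5, 7, 9, 11}
--
-- def build_major_offsets_3_octaves(max_semitones=36):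
--     # single pass over the flat 4-octave semitone axis; result is sorted and
--     # duplicate-free by construction, so no sorted(set(...)) is needed
--     return [s for s in range(0, 48) if s <= max_semitones and s % 12 in _PC]
-- ===== Notes on version B (the rewrite author's own statement) =====
-- stated objective: simpler
-- what changed: Replaces the nested octave-by-degree generation followed by sorted(set(...)) with one linear scan of the flat semitone range 0..47 keeping s when s <= max_semitones and s % 12 is a major pitch class; the output is sorted and duplicate-free by construction.
import Mathlib
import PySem

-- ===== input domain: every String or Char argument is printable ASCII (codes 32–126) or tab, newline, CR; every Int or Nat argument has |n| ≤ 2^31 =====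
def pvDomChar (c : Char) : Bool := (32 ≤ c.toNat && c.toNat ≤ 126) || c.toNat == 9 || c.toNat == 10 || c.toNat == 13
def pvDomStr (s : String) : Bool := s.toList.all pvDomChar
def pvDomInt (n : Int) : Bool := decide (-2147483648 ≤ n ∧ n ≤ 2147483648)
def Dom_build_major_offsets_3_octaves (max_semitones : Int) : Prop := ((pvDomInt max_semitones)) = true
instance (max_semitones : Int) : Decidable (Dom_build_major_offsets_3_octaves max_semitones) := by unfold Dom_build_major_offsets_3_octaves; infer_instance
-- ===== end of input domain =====

-- B replaces A's nested octave-by-degree generation plus sorted(set(...)) by one linear scan of the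
-- flat semitone range 0..47 with a pitch-class test (objective: simpler; output equal, not faster).


-- ===== PORT A =====
def MAJOR_DEGREES : List Int := [0, 2, 4, 5, 7, 9, 11]

def build_major_offsets_3_octaves (max_semitones : Int) : List Int :=
  PySem.List.sorted
    (PySem.Set.ofList
      ((PySem.List.pyRange 0 4 1).foldl (fun offs octv =>
        MAJOR_DEGREES.foldl (fun offs d =>
          if octv * 12 + d ≤ max_semitones then offs ++ [octv * 12 + d] else offs) offs) []))
    (fun x => x) false

-- ===== PORT B =====
def pvPC : List Int := [0, 2, 4, 5, 7, 9, 11]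

def build_major_offsets_3_octaves_alt (max_semitones : Int) : List Int :=
  (PySem.List.pyRange 0 48 1).filter
    (fun s => decide (s ≤ max_semitones) && pvPC.contains (PySem.Int.mod s 12))

-- ===== PRECONDITION & SPEC =====
def Spec_build_major_offsets_3_octaves (max_semitones : Int) (out : List Int) : Prop := out = build_major_offsets_3_octaves_alt max_semitones
instance (max_semitones : Int) (out : List Int) : Decidable (Spec_build_major_offsets_3_octaves max_semitones out) := by unfold Spec_build_major_offsets_3_octaves; infer_instance

-- ===== CLAIM (what is proved, stated in full; the proofs are below) =====
def Claim_equal_build_major_offsets_3_octaves : Prop := ∀ (max_semitones : Int), Dom_build_major_offsets_3_octaves max_semitones → Spec_build_major_offsets_3_octaves max_semitones (build_major_offsets_3_octaves max_semitones)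

-- ===== LEMMAS AND PROOFS =====

-- the 28 major-scale offsets of the full 4-octave span A reaches, in order
def pvL : List Int :=
  [0, 2, 4, 5, 7, 9, 11, 12, 14, 16, 17, 19, 21, 23,
   24, 26, 28, 29, 31, 33, 35, 36, 38, 40, 41, 43, 45, 47]

-- foldl Set.add over a nodup list of elements fresh for the accumulator just appends them
theorem pv_foldl_add_nodup (t : List Int) : ∀ s : List Int, t.Nodup → (∀ x ∈ t, x ∉ s) → t.foldl PySem.Set.add s = s ++ t := by
  induction t with
  | nil => simp
  | cons a u ih =>
    intro s hn hd
    have ha : a ∉ s := hd a (by simp)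
    have hadd : PySem.Set.add s a = s ++ [a] := by simp [PySem.Set.add, PySem.Set.contains, ha]
    simp only [List.foldl_cons, hadd]
    rw [ih (s ++ [a]) hn.of_cons]
    · simp
    · intro x hx
      simp only [List.mem_append, List.mem_singleton]
      rintro (h | rfl)
      · exact hd x (by simp [hx]) h
      · exact (List.nodup_cons.mp hn).1 hx

theorem pv_ofList_nodup (xs : List Int) (h : xs.Nodup) : PySem.Set.ofList xs = xs := by
  rw [PySem.Set.ofList_eq_foldl, pv_foldl_add_nodup xs [] h (by simp)]; simp

-- A's generated list is pvL filtered by the cap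
theorem pvA_offs (m : Int) :
    (PySem.List.pyRange 0 4 1).foldl (fun offs octv =>
      MAJOR_DEGREES.foldl (fun offs d =>
        if octv * 12 + d ≤ m then offs ++ [octv * 12 + d] else offs) offs) []
    = pvL.filter (fun s => decide (s ≤ m)) := by
  have hin : ∀ (octv : Int) (acc : List Int),
      MAJOR_DEGREES.foldl (fun offs d =>
        if octv * 12 + d ≤ m then offs ++ [octv * 12 + d] else offs) acc
      = acc ++ (MAJOR_DEGREES.filter (fun d => decide (octv * 12 + d ≤ m))).map
          (fun d => octv * 12 + d) := by
    intro octv acc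
    simpa using PySem.List.foldl_append_if
      (l := MAJOR_DEGREES) (p := fun d => decide (octv * 12 + d ≤ m))
      (f := fun d => octv * 12 + d) (acc := acc)
  have hchunk : ∀ c : Int,
      (MAJOR_DEGREES.filter (fun d => decide (c * 12 + d ≤ m))).map (fun d => c * 12 + d)
      = (MAJOR_DEGREES.map (fun d => c * 12 + d)).filter (fun s => decide (s ≤ m)) := by
    intro c
    induction MAJOR_DEGREES with
    | nil => rfl
    | cons a t ih => by_cases h : c * 12 + a ≤ m <;> simp [List.filter_cons, h, ih]
  have hrange : PySem.List.pyRange 0 4 1 = [0, 1, 2, 3] := by decide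
  rw [hrange]
  simp only [List.foldl_cons, List.foldl_nil, hin, List.nil_append, hchunk]
  rw [← List.filter_append, ← List.filter_append, ← List.filter_append]
  have hL : MAJOR_DEGREES.map (fun d => (0:Int) * 12 + d)
      ++ MAJOR_DEGREES.map (fun d => (1:Int) * 12 + d)
      ++ MAJOR_DEGREES.map (fun d => (2:Int) * 12 + d)
      ++ MAJOR_DEGREES.map (fun d => (3:Int) * 12 + d) = pvL := by decide
  rw [hL]

-- B is the same filtered list
theorem pvB (m : Int) :
    build_major_offsets_3_octaves_alt m = pvL.filter (fun s => decide (s ≤ m)) := by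
  unfold build_major_offsets_3_octaves_alt
  have h1 : (PySem.List.pyRange 0 48 1).filter
      (fun s => pvPC.contains (PySem.Int.mod s 12)) = pvL := by decide
  have h2 : (PySem.List.pyRange 0 48 1).filter
      (fun s => decide (s ≤ m) && pvPC.contains (PySem.Int.mod s 12))
      = ((PySem.List.pyRange 0 48 1).filter
          (fun s => pvPC.contains (PySem.Int.mod s 12))).filter
          (fun s => decide (s ≤ m)) := by
    rw [List.filter_filter]
  rw [h2, h1]

-- ===== VERDICT (by name: the statement is the Claim_ definition above) =====
theorem build_major_offsets_3_octaves_spec : Claim_equal_build_major_offsets_3_octaves := by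
  intro m _
  unfold Spec_build_major_offsets_3_octaves build_major_offsets_3_octaves
  rw [pvA_offs]
  have hnd : (pvL.filter (fun s => decide (s ≤ m))).Nodup :=
    (by decide : pvL.Nodup).filter _
  have hpw : (pvL.filter (fun s => decide (s ≤ m))).Pairwise (· < ·) :=
    (by decide : pvL.Pairwise (· < ·)).filter _
  rw [pv_ofList_nodup _ hnd, pvB]
  exact PySem.List.sorted_eq_of_perm_of_pairwise_lt _ _ _ (List.Perm.refl _) hpw
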